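-- pv_equiv track=rewrite | github.com/kvrancic/Theory-of-Computation | nondeterministic-finite-automata-withE/SimEnka.py | nka_simulator
-- ===== SOURCE A (Python) =====
-- def epsilon_prijelazi(stanje, tranzicije):
--     closure = set()
--     stack = [stanje]
--     while stack:
--         curr = stack.pop()
--         closure.add(curr)
--         epsilon_next = tranzicije.get((curr, '$'), set())
--         for next in epsilon_next:
--             if next not in closure:
--                 stack.append(next)
--     return closure
--
-- def nka_simulator(ulazni_niz, skup_stanja, abeceda, prihvatljiva_stanja, pocetno_stanje, fje_prijelaza):
--     res = []
--     ulaz = ulazni_niz.split(',')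
--     l = []
--     trenutna_potencijalna_stanja = epsilon_prijelazi(pocetno_stanje, fje_prijelaza)
--     for simbol in ulaz:
--         l = list(trenutna_potencijalna_stanja)
--         l.sort()
--         if '#' in l and len(l) > 1:
--             l.remove('#')
--         res.append(','.join(l)) if trenutna_potencijalna_stanja else res.append('#')
--         sljedeca_stanja = set()
--         for stanje in trenutna_potencijalna_stanja:
--             sljedeca_stanja |= fje_prijelaza.get((stanje, simbol), set())
--         nova_stanja = set()
--         for stanje in sljedeca_stanja:
--             nova_stanja |= epsilon_prijelazi(stanje, fje_prijelaza)
--         trenutna_potencijalna_stanja = nova_stanja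
--         res.append('|')
--     l = list(trenutna_potencijalna_stanja)
--     l.sort()
--     if '#' in l and len(l) > 1:
--         l.remove('#')
--     res.append(','.join(l)) if trenutna_potencijalna_stanja else res.append('#')
--     return res
-- ===== SOURCE B (Python) =====
-- def _eps_closure(stanje, tranzicije):
--     closure = set()
--     stack = [stanje]
--     while stack:
--         curr = stack.pop()
--         closure.add(curr)
--         for nx in tranzicije.get((curr, '$'), set()):
--             if nx not in closure:
--                 stack.append(nx)
--     return closure
--
--
-- def _fmt(states):
--     core = states - {'#'}
--     return ','.join(sorted(core)) if core else '#'
--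
--
-- def nka_simulator(ulazni_niz, skup_stanja, abeceda, prihvatljiva_stanja, pocetno_stanje, fje_prijelaza):
--     # each state's epsilon-closure is computed at most once per run (cached)
--     cache = {}
--
--     def clos(s):
--         if s not in cache:
--             cache[s] = _eps_closure(s, fje_prijelaza)
--         return cache[s]
--
--     cur = clos(pocetno_stanje)
--     sets = [cur]
--     for simbol in ulazni_niz.split(','):
--         nxt = set()
--         for stanje in cur:
--             for t in fje_prijelaza.get((stanje, simbol), set()):
--                 nxt |= clos(t)
--         cur = nxt
--         sets.append(cur)
--     out = []
--     for s in sets: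
--         out.append(_fmt(s))
--         out.append('|')
--     out.pop()
--     return out
-- ===== Notes on version B (the rewrite author's own statement) =====
-- stated objective: alternative
-- what changed: B memoises the epsilon-closure of each state in a cache so each closure is computed at most once per run instead of once per (symbol, successor) visit, merges A's two-stage successor/closure union loops into one nested pass, formats a state set by set-difference {'#'} instead of sort-then-remove, and renders the output by collecting the state sets first and interleaving '|' at the end.
import Mathlib
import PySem

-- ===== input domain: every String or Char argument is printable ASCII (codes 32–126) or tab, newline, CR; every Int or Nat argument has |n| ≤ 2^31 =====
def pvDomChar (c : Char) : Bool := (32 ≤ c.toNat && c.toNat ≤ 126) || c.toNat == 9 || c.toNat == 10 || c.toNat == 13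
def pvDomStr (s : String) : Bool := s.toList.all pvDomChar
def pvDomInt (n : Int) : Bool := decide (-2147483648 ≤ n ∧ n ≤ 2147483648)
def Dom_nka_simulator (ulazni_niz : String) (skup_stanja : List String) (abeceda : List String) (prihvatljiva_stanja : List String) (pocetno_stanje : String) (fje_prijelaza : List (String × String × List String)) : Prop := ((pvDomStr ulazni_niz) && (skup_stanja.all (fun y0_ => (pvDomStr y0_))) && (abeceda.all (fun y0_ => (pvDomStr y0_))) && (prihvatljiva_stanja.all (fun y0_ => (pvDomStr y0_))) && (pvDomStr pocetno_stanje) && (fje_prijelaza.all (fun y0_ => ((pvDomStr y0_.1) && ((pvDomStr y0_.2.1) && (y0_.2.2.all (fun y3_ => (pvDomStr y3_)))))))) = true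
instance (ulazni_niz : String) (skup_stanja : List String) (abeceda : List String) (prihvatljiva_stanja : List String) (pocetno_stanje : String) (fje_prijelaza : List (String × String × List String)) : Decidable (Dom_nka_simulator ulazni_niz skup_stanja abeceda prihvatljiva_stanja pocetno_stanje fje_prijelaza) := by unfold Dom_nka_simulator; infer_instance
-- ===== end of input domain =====

-- B memoises the epsilon-closure of each state (computed once per run, not once per symbol and
-- successor), folds A's two union loops into one nested pass, formats via set-difference, and
-- renders the '|'-interleaved output at the end: an alternative algorithm, same return value everywhere.

-- ===== PORT A =====
-- shared helper: fje_prijelaza.get((s, c), set()) on the association list (first match, per the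
-- dict convention); the flattened triple (state, symbol, targets) stands for key (state, symbol).
def lookupT (d : List (String × String × List String)) (s c : String) : List String :=
  match d.find? (fun e => e.1 == s && e.2.1 == c) with
  | some e => e.2.2
  | none => []

-- the while-loop of epsilon_prijelazi (a helper both Python files contain verbatim).
-- The Lean stack pushes by cons and pops the head, which mirrors Python's append/pop-from-the-end
-- LIFO order; the fuel provably exceeds the number of iterations the Python loop performs
-- (each pop either adds a new state to the closure — at most 1 + Σ|targets| times — or pushes
-- nothing), so the fueled loop computes exactly the Python closure set.
def epsLoop (d : List (String × String × List String)) :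
    Nat → PySem.Set String → List String → PySem.Set String
  | 0, closure, _ => closure
  | _ + 1, closure, [] => closure
  | fuel + 1, closure, curr :: stack =>
    let closure := PySem.Set.add closure curr
    let stack := (lookupT d curr "$").foldl
      (fun st nx => if PySem.Set.contains closure nx then st else nx :: st) stack
    epsLoop d fuel closure stack

def epsClosure (stanje : String) (d : List (String × String × List String)) : PySem.Set String :=
  epsLoop d ((1 + (d.map (fun e => e.2.2.length)).sum) * (2 + d.length)) PySem.Set.empty [stanje]

-- A's inline formatting of the current state set (the l = sorted(...)/remove('#')/append block)
def fmtA (tren : PySem.Set String) : String :=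
  let l := PySem.List.sorted tren (fun x => x) false
  let l := if "#" ∈ l ∧ 1 < l.length then (PySem.List.remove? l "#").getD l else l
  if tren.isEmpty then "#" else PySem.Str.join "," l

-- A's two per-symbol loops: sljedeca_stanja, then nova_stanja
def stepA (d : List (String × String × List String)) (simbol : String)
    (tren : PySem.Set String) : PySem.Set String :=
  let slj := tren.foldl (fun s st => PySem.Set.union s (lookupT d st simbol)) PySem.Set.empty
  slj.foldl (fun s st => PySem.Set.union s (epsClosure st d)) PySem.Set.empty

def nka_simulator (ulazni_niz : String) (skup_stanja : List String) (abeceda : List String) (prihvatljiva_stanja : List String) (pocetno_stanje : String) (fje_prijelaza : List (String × String × List String)) : List String :=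
  let ulaz := (PySem.Str.split? ulazni_niz ",").getD []
  let fin := ulaz.foldl
    (fun (st : List String × PySem.Set String) simbol =>
      (st.1 ++ [fmtA st.2] ++ ["|"], stepA fje_prijelaza simbol st.2))
    ([], epsClosure pocetno_stanje fje_prijelaza)
  fin.1 ++ [fmtA fin.2]

-- ===== PORT B =====
-- B's lazy cache of epsilon-closures: clos(s) looks s up and fills the cache on a miss
def closCache (d : List (String × String × List String))
    (cache : PySem.Dict String (List String)) (s : String) :
    List String × PySem.Dict String (List String) :=
  if PySem.Dict.contains cache s then (PySem.Dict.getD cache s [], cache)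
  else
    let v := epsClosure s d
    (v, PySem.Dict.insert cache s v)

-- B's _fmt: ','.join(sorted(states - {'#'})) if that difference is nonempty else '#'
def fmtB (states : PySem.Set String) : String :=
  let core := PySem.Set.diff states ["#"]
  if core.isEmpty then "#" else PySem.Str.join "," (PySem.List.sorted core (fun x => x) false)

-- B's single nested per-symbol loop: union the (cached) closures of all successors directly
def stepB (d : List (String × String × List String)) (simbol : String)
    (cur : PySem.Set String) (cache : PySem.Dict String (List String)) :
    PySem.Set String × PySem.Dict String (List String) :=
  cur.foldl
    (fun q st =>
      (lookupT d st simbol).foldl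
        (fun q t =>
          let r := closCache d q.2 t
          (PySem.Set.union q.1 r.1, r.2))
        q)
    (PySem.Set.empty, cache)

def nka_simulator_alt (ulazni_niz : String) (skup_stanja : List String) (abeceda : List String) (prihvatljiva_stanja : List String) (pocetno_stanje : String) (fje_prijelaza : List (String × String × List String)) : List String :=
  let c0 := closCache fje_prijelaza PySem.Dict.empty pocetno_stanje
  let fin := ((PySem.Str.split? ulazni_niz ",").getD []).foldl
    (fun (st : List (PySem.Set String) × PySem.Set String × PySem.Dict String (List String)) simbol =>
      let p := stepB fje_prijelaza simbol st.2.1 st.2.2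
      (st.1 ++ [p.1], p.1, p.2))
    ([c0.1], c0.1, c0.2)
  -- out.append(_fmt(s)); out.append('|') per set, then out.pop(); out is never empty
  -- (split(',') yields at least one field), so the pop is exactly dropLast
  (fin.1.foldl (fun acc s => acc ++ [fmtB s, "|"]) []).dropLast

-- ===== PRECONDITION & SPEC =====
def Spec_nka_simulator (ulazni_niz : String) (skup_stanja : List String) (abeceda : List String) (prihvatljiva_stanja : List String) (pocetno_stanje : String) (fje_prijelaza : List (String × String × List String)) (out : List String) : Prop := out = nka_simulator_alt ulazni_niz skup_stanja abeceda prihvatljiva_stanja pocetno_stanje fje_prijelaza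
instance (ulazni_niz : String) (skup_stanja : List String) (abeceda : List String) (prihvatljiva_stanja : List String) (pocetno_stanje : String) (fje_prijelaza : List (String × String × List String)) (out : List String) : Decidable (Spec_nka_simulator ulazni_niz skup_stanja abeceda prihvatljiva_stanja pocetno_stanje fje_prijelaza out) := by unfold Spec_nka_simulator; infer_instance

-- ===== CLAIM (what is proved, stated in full; the proofs are below) =====
def Claim_equal_nka_simulator : Prop := ∀ (ulazni_niz : String) (skup_stanja : List String) (abeceda : List String) (prihvatljiva_stanja : List String) (pocetno_stanje : String) (fje_prijelaza : List (String × String × List String)), Dom_nka_simulator ulazni_niz skup_stanja abeceda prihvatljiva_stanja pocetno_stanje fje_prijelaza → Spec_nka_simulator ulazni_niz skup_stanja abeceda prihvatljiva_stanja pocetno_stanje fje_prijelaza (nka_simulator ulazni_niz skup_stanja abeceda prihvatljiva_stanja pocetno_stanje fje_prijelaza)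

-- ===== LEMMAS AND PROOFS =====

-- two state sets agree as sets
def RelSet (a b : PySem.Set String) : Prop := a.Nodup ∧ b.Nodup ∧ ∀ x, x ∈ a ↔ x ∈ b

-- every cached closure is correct
def invCache (d : List (String × String × List String))
    (cache : PySem.Dict String (List String)) : Prop :=
  ∀ k v, PySem.Dict.get? cache k = some v → v = epsClosure k d

lemma epsLoop_nodup (d : List (String × String × List String)) :
    ∀ (fuel : Nat) (closure : PySem.Set String) (stack : List String),
      closure.Nodup → (epsLoop d fuel closure stack).Nodup := by
  intro fuel
  induction fuel with
  | zero => intro closure stack h; simpa [epsLoop] using h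
  | succ n ih =>
    intro closure stack h
    cases stack with
    | nil => simpa [epsLoop] using h
    | cons curr stack =>
      simp only [epsLoop]
      exact ih _ _ (PySem.Set.nodup_add _ _ h)

lemma epsClosure_nodup (s : String) (d : List (String × String × List String)) :
    (epsClosure s d).Nodup := by
  unfold epsClosure
  exact epsLoop_nodup d _ _ _ List.nodup_nil

lemma mem_foldl_union {β : Type} (g : β → List String) :
    ∀ (L : List β) (init : PySem.Set String) (y : String),
      (y ∈ L.foldl (fun s x => PySem.Set.union s (g x)) init) ↔
        y ∈ init ∨ ∃ x ∈ L, y ∈ g x := by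
  intro L
  induction L with
  | nil => simp
  | cons a L ih =>
    intro init y
    simp only [List.foldl_cons, ih, PySem.Set.mem_union, List.mem_cons]
    constructor
    · rintro (⟨h | h⟩ | ⟨x, hx, hy⟩)
      · exact Or.inl h
      · exact Or.inr ⟨a, Or.inl rfl, h⟩
      · exact Or.inr ⟨x, Or.inr hx, hy⟩
    · rintro (h | ⟨x, (rfl | hx), hy⟩)
      · exact Or.inl (Or.inl h)
      · exact Or.inl (Or.inr hy)
      · exact Or.inr ⟨x, hx, hy⟩

lemma nodup_foldl_union {β : Type} (g : β → List String) :
    ∀ (L : List β) (init : PySem.Set String),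
      init.Nodup → (L.foldl (fun s x => PySem.Set.union s (g x)) init).Nodup := by
  intro L
  induction L with
  | nil => intro init h; simpa using h
  | cons a L ih =>
    intro init h
    exact ih _ (PySem.Set.nodup_union _ _ h)

lemma closCache_spec (d : List (String × String × List String))
    (cache : PySem.Dict String (List String)) (s : String) (hinv : invCache d cache) :
    (closCache d cache s).1 = epsClosure s d ∧ invCache d (closCache d cache s).2 := by
  unfold closCache
  by_cases h : PySem.Dict.contains cache s = true
  · rw [if_pos h]
    refine ⟨?_, hinv⟩
    have hsome : (PySem.Dict.get? cache s).isSome := by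
      rw [← PySem.Dict.contains_eq_isSome_get?]; exact h
    obtain ⟨v, hv⟩ := Option.isSome_iff_exists.mp hsome
    rw [PySem.Dict.getD_eq_get?_getD, hv, Option.getD_some]
    exact hinv s v hv
  · rw [if_neg h]
    refine ⟨rfl, ?_⟩
    intro k v hk
    rw [PySem.Dict.get?_insert] at hk
    split_ifs at hk with hks
    · rw [hks]
      exact (Option.some_inj.mp hk).symm
    · exact hinv k v hk

lemma stepA_mem (d : List (String × String × List String)) (simbol : String)
    (tren : PySem.Set String) (y : String) :
    y ∈ stepA d simbol tren ↔
      ∃ st ∈ tren, ∃ t ∈ lookupT d st simbol, y ∈ epsClosure t d := by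
  unfold stepA
  simp only []
  rw [mem_foldl_union]
  constructor
  · rintro (h | ⟨t, ht, hy⟩)
    · simp [PySem.Set.empty] at h
    · rcases (mem_foldl_union _ _ _ _).mp ht with h | ⟨st, hst, htl⟩
      · simp [PySem.Set.empty] at h
      · exact ⟨st, hst, t, htl, hy⟩
  · rintro ⟨st, hst, t, htl, hy⟩
    refine Or.inr ⟨t, ?_, hy⟩
    exact (mem_foldl_union _ _ _ _).mpr (Or.inr ⟨st, hst, htl⟩)

lemma stepA_nodup (d : List (String × String × List String)) (simbol : String)
    (tren : PySem.Set String) : (stepA d simbol tren).Nodup := by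
  unfold stepA
  have hempty : (PySem.Set.empty : PySem.Set String).Nodup := List.nodup_nil
  exact nodup_foldl_union (fun st => epsClosure st d) _ PySem.Set.empty hempty

-- the inner for-t loop of B's step
lemma stepB_inner (d : List (String × String × List String)) :
    ∀ (ts : List String) (q : PySem.Set String × PySem.Dict String (List String)),
      invCache d q.2 → q.1.Nodup →
      (((ts.foldl (fun q t =>
        (PySem.Set.union q.1 (closCache d q.2 t).1, (closCache d q.2 t).2)) q)).1.Nodup ∧
       invCache d ((ts.foldl (fun q t =>
        (PySem.Set.union q.1 (closCache d q.2 t).1, (closCache d q.2 t).2)) q)).2 ∧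
        ∀ y, (y ∈ ((ts.foldl (fun q t =>
        (PySem.Set.union q.1 (closCache d q.2 t).1, (closCache d q.2 t).2)) q)).1 ↔
          y ∈ q.1 ∨ ∃ t ∈ ts, y ∈ epsClosure t d)) := by
  intro ts
  induction ts with
  | nil => intro q hq hn; exact ⟨hn, hq, by simp⟩
  | cons a ts ih =>
    intro q hq hn
    obtain ⟨hv, hinv'⟩ := closCache_spec d q.2 a hq
    obtain ⟨h1, h2, h3⟩ := ih (PySem.Set.union q.1 (closCache d q.2 a).1, (closCache d q.2 a).2)
      hinv' (PySem.Set.nodup_union _ _ hn)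
    refine ⟨h1, h2, ?_⟩
    intro y
    rw [List.foldl_cons]
    rw [h3 y]
    simp only [PySem.Set.mem_union, hv, List.mem_cons]
    constructor
    · rintro (⟨h | h⟩ | ⟨t, ht, hy⟩)
      · exact Or.inl h
      · exact Or.inr ⟨a, Or.inl rfl, h⟩
      · exact Or.inr ⟨t, Or.inr ht, hy⟩
    · rintro (h | ⟨t, (rfl | ht), hy⟩)
      · exact Or.inl (Or.inl h)
      · exact Or.inl (Or.inr hy)
      · exact Or.inr ⟨t, ht, hy⟩

lemma stepB_spec (d : List (String × String × List String)) (simbol : String) :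
    ∀ (cur : List String) (acc : PySem.Set String × PySem.Dict String (List String)),
      invCache d acc.2 → acc.1.Nodup →
      ((cur.foldl (fun q st =>
        (lookupT d st simbol).foldl (fun q t =>
          (PySem.Set.union q.1 (closCache d q.2 t).1, (closCache d q.2 t).2)) q) acc).1.Nodup ∧
       invCache d (cur.foldl (fun q st =>
        (lookupT d st simbol).foldl (fun q t =>
          (PySem.Set.union q.1 (closCache d q.2 t).1, (closCache d q.2 t).2)) q) acc).2 ∧
        ∀ y, (y ∈ (cur.foldl (fun q st =>
        (lookupT d st simbol).foldl (fun q t =>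
          (PySem.Set.union q.1 (closCache d q.2 t).1, (closCache d q.2 t).2)) q) acc).1 ↔
          y ∈ acc.1 ∨ ∃ st ∈ cur, ∃ t ∈ lookupT d st simbol, y ∈ epsClosure t d)) := by
  intro cur
  induction cur with
  | nil => intro acc hq hn; exact ⟨hn, hq, by simp⟩
  | cons a cur ih =>
    intro acc hq hn
    obtain ⟨h1, h2, h3⟩ := stepB_inner d (lookupT d a simbol) acc hq hn
    obtain ⟨g1, g2, g3⟩ := ih _ h2 h1
    refine ⟨g1, g2, ?_⟩
    intro y
    rw [List.foldl_cons]
    rw [g3 y, h3 y]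
    simp only [List.mem_cons]
    constructor
    · rintro ((h | ⟨t, ht, hy⟩) | ⟨st, hst, ht⟩)
      · exact Or.inl h
      · exact Or.inr ⟨a, Or.inl rfl, t, ht, hy⟩
      · exact Or.inr ⟨st, Or.inr hst, ht⟩
    · rintro (h | ⟨st, (rfl | hst), ht⟩)
      · exact Or.inl (Or.inl h)
      · exact Or.inl (Or.inr ht)
      · exact Or.inr ⟨st, hst, ht⟩

lemma stepB_eq_fold (d : List (String × String × List String)) (simbol : String)
    (cur : PySem.Set String) (cache : PySem.Dict String (List String)) :
    stepB d simbol cur cache = cur.foldl (fun q st =>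
        (lookupT d st simbol).foldl (fun q t =>
          (PySem.Set.union q.1 (closCache d q.2 t).1, (closCache d q.2 t).2)) q)
      (PySem.Set.empty, cache) := rfl

lemma step_rel (d : List (String × String × List String)) (simbol : String)
    (a b : PySem.Set String) (cache : PySem.Dict String (List String))
    (hab : RelSet a b) (hinv : invCache d cache) :
    RelSet (stepA d simbol a) (stepB d simbol b cache).1 ∧
      invCache d (stepB d simbol b cache).2 := by
  obtain ⟨ha, hb, h⟩ := hab
  obtain ⟨h1, h2, h3⟩ := stepB_spec d simbol b (PySem.Set.empty, cache) hinv List.nodup_nil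
  rw [stepB_eq_fold]
  refine ⟨⟨stepA_nodup d simbol a, h1, ?_⟩, h2⟩
  intro y
  rw [stepA_mem, h3 y]
  simp only [PySem.Set.empty, List.not_mem_nil, false_or]
  constructor
  · rintro ⟨st, hst, rest⟩; exact ⟨st, (h st).mp hst, rest⟩
  · rintro ⟨st, hst, rest⟩; exact ⟨st, (h st).mpr hst, rest⟩

lemma two_le_length_of_two_mem {b : List String} (x y : String) (hxy : x ≠ y)
    (hx : x ∈ b) (hy : y ∈ b) : 1 < b.length := by
  obtain ⟨s, t, rfl⟩ := List.append_of_mem hy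
  have hx' : x ∈ s ++ t := by
    rcases List.mem_append.mp hx with h | h
    · exact List.mem_append.mpr (Or.inl h)
    · rcases List.mem_cons.mp h with h | h
      · exact absurd h hxy
      · exact List.mem_append.mpr (Or.inr h)
  have : 0 < (s ++ t).length := List.length_pos_of_mem hx'
  simp only [List.length_append, List.length_cons] at *
  omega

lemma fmt_eq (a b : PySem.Set String) (hab : RelSet a b) : fmtA a = fmtB b := by
  obtain ⟨ha, hb, h⟩ := hab
  have hperm : a.Perm b := (List.perm_ext_iff_of_nodup ha hb).mpr h
  have hsort : PySem.List.sorted a (fun x => x) false = PySem.List.sorted b (fun x => x) false :=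
    PySem.List.sorted_eq_sorted_of_perm a b (fun x => x) (fun _ _ hxy => hxy) hperm
  by_cases hbnil : b = []
  · subst hbnil
    have : a = [] := List.eq_nil_iff_forall_not_mem.mpr (fun x hx => by simpa using (h x).mp hx)
    subst this
    rfl
  · have hanil : a ≠ [] := fun hcon => hbnil
      (List.eq_nil_iff_forall_not_mem.mpr (fun x hx => by
        have := (h x).mpr hx; subst hcon; simp at this))
    have haemp : a.isEmpty = false := by simp [hanil]
    have hcore_mem : ∀ y, y ∈ PySem.Set.diff b ["#"] ↔ y ∈ b ∧ y ≠ "#" := by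
      intro y; rw [PySem.Set.mem_diff]; simp
    have hcore_nodup : (PySem.Set.diff b ["#"]).Nodup := PySem.Set.nodup_diff _ _ hb
    simp only [fmtA, fmtB, hsort, haemp, Bool.false_eq_true, if_false]
    by_cases hh : "#" ∈ b
    · by_cases hall : ∀ y ∈ b, y = "#"
      · have hb1 : b = ["#"] := by
          cases b with
          | nil => exact absurd rfl hbnil
          | cons x t =>
            have hx : x = "#" := hall x (List.mem_cons_self)
            have ht : t = [] := by
              refine List.eq_nil_iff_forall_not_mem.mpr (fun y hy => ?_)
              have hy' : y = "#" := hall y (List.mem_cons_of_mem _ hy)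
              have hxt := (List.nodup_cons.mp hb).1
              exact hxt (by rw [hx, ← hy']; exact hy)
            rw [hx, ht]
        subst hb1
        decide
      · rw [not_forall] at hall
        simp only [not_forall, exists_prop] at hall
        obtain ⟨y, hy, hyne⟩ := hall
        have hlen : 1 < b.length := two_le_length_of_two_mem "#" y (fun hc => hyne hc.symm) hh hy
        have hcore_ne : (PySem.Set.diff b ["#"]).isEmpty = false := by
          rw [List.isEmpty_eq_false_iff_exists_mem]
          exact ⟨y, (hcore_mem y).mpr ⟨hy, hyne⟩⟩
        have hmem : "#" ∈ PySem.List.sorted b (fun x => x) false := by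
          rw [PySem.List.mem_sorted]; exact hh
        have hlen' : 1 < (PySem.List.sorted b (fun x => x) false).length := by
          rw [PySem.List.length_sorted]; exact hlen
        simp only [hmem, hlen', and_self, if_true, hcore_ne, Bool.false_eq_true, if_false]
        rw [PySem.List.remove?_eq_some_erase _ _ hmem, Option.getD_some]
        congr 1
        have hpairwise : ((PySem.List.sorted b (fun x => x) false).erase "#").Pairwise
            (· ≤ ·) := by
          have hp := PySem.List.sorted_pairwise b (fun x => x)
          exact List.Pairwise.sublist (List.erase_sublist) (by simpa using hp)
        have hpermc : ((PySem.List.sorted b (fun x => x) false).erase "#").Perm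
            (PySem.Set.diff b ["#"]) := by
          have h1 : ((PySem.List.sorted b (fun x => x) false).erase "#").Perm (b.erase "#") :=
            (PySem.List.sorted_perm b (fun x => x) false).erase "#"
          refine h1.trans ?_
          refine (List.perm_ext_iff_of_nodup (List.Nodup.erase _ hb) hcore_nodup).mpr ?_
          intro z
          rw [List.Nodup.mem_erase_iff hb, hcore_mem z]
          tauto
        exact (PySem.List.sorted_id_eq_of_perm_of_pairwise _ _ hpermc hpairwise).symm
    · have hmem : "#" ∉ PySem.List.sorted b (fun x => x) false := by
        rw [PySem.List.mem_sorted]; exact hh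
      obtain ⟨y, hy⟩ := List.exists_mem_of_ne_nil b hbnil
      have hyne : y ≠ "#" := fun hc => hh (hc ▸ hy)
      have hcore_ne : (PySem.Set.diff b ["#"]).isEmpty = false := by
        rw [List.isEmpty_eq_false_iff_exists_mem]
        exact ⟨y, (hcore_mem y).mpr ⟨hy, hyne⟩⟩
      simp only [hmem, false_and, if_false, hcore_ne, Bool.false_eq_true]
      congr 1
      refine PySem.List.sorted_eq_sorted_of_perm _ _ (fun x => x) (fun _ _ hxy => hxy) ?_
      refine (List.perm_ext_iff_of_nodup hb hcore_nodup).mpr ?_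
      intro z
      rw [hcore_mem z]
      exact ⟨fun hz => ⟨hz, fun hc => hh (hc ▸ hz)⟩, fun hz => hz.1⟩

-- B's sets accumulator only ever appends
lemma Bfold_prefix (d : List (String × String × List String)) :
    ∀ (syms : List String) (sets : List (PySem.Set String)) (cur : PySem.Set String)
      (cache : PySem.Dict String (List String)),
      (syms.foldl (fun st simbol =>
        (st.1 ++ [(stepB d simbol st.2.1 st.2.2).1], (stepB d simbol st.2.1 st.2.2).1,
          (stepB d simbol st.2.1 st.2.2).2)) (sets, cur, cache)).1
      = sets ++ (syms.foldl (fun st simbol =>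
        (st.1 ++ [(stepB d simbol st.2.1 st.2.2).1], (stepB d simbol st.2.1 st.2.2).1,
          (stepB d simbol st.2.1 st.2.2).2)) (([] : List (PySem.Set String)), cur, cache)).1 := by
  intro syms
  induction syms with
  | nil => intro sets cur cache; simp
  | cons s syms ih =>
    intro sets cur cache
    simp only [List.foldl_cons]
    rw [ih (sets ++ _), ih ([] ++ _)]
    simp

-- the rendered output: fmt strings separated by '|'
def renderSets : List (PySem.Set String) → List String
  | [] => []
  | [s] => [fmtB s]
  | s :: t => fmtB s :: "|" :: renderSets t

lemma renderSets_cons (s0 : PySem.Set String) (t : List (PySem.Set String)) (h : t ≠ []) :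
    renderSets (s0 :: t) = fmtB s0 :: "|" :: renderSets t := by
  cases t with
  | nil => exact absurd rfl h
  | cons r rs => rfl

lemma render_flat (l : List (PySem.Set String)) :
    l.foldl (fun acc s => acc ++ [fmtB s, "|"]) [] = l.flatMap (fun s => [fmtB s, "|"]) := by
  simpa using PySem.List.foldl_append_eq_flatMap (fun s => [fmtB s, "|"]) l []

lemma render_dropLast : ∀ (l : List (PySem.Set String)), l ≠ [] →
    (l.foldl (fun acc s => acc ++ [fmtB s, "|"]) []).dropLast = renderSets l := by
  intro l
  induction l with
  | nil => intro h; exact absurd rfl h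
  | cons s t ih =>
    intro _
    rw [render_flat]
    cases t with
    | nil => rfl
    | cons r rs =>
      rw [List.flatMap_cons, List.dropLast_append_of_ne_nil (by simp)]
      rw [← render_flat, ih (by simp)]
      rw [renderSets_cons s (r :: rs) (by simp)]
      rfl

lemma main_lemma (d : List (String × String × List String)) :
    ∀ (syms : List String) (res : List String) (curA curB : PySem.Set String)
      (cache : PySem.Dict String (List String)),
      invCache d cache → RelSet curA curB →
      (syms.foldl (fun (st : List String × PySem.Set String) simbol =>
          (st.1 ++ [fmtA st.2] ++ ["|"], stepA d simbol st.2)) (res, curA)).1 ++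
        [fmtA (syms.foldl (fun (st : List String × PySem.Set String) simbol =>
          (st.1 ++ [fmtA st.2] ++ ["|"], stepA d simbol st.2)) (res, curA)).2]
      = res ++ (((syms.foldl (fun st simbol =>
        (st.1 ++ [(stepB d simbol st.2.1 st.2.2).1], (stepB d simbol st.2.1 st.2.2).1,
          (stepB d simbol st.2.1 st.2.2).2)) ([curB], curB, cache)).1).foldl
            (fun acc s => acc ++ [fmtB s, "|"]) []).dropLast := by
  intro syms
  induction syms with
  | nil =>
    intro res curA curB cache hinv hrel
    simp only [List.foldl_nil]
    rw [render_dropLast _ (by simp), fmt_eq curA curB hrel]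
    rfl
  | cons s syms ih =>
    intro res curA curB cache hinv hrel
    obtain ⟨hrel', hinv'⟩ := step_rel d s curA curB cache hrel hinv
    simp only [List.foldl_cons]
    have hpre := Bfold_prefix d syms [(stepB d s curB cache).1]
      (stepB d s curB cache).1 (stepB d s curB cache).2
    rw [Bfold_prefix d syms]
    rw [render_dropLast _ (by simp)]
    simp only [List.cons_append, List.nil_append]
    rw [renderSets_cons (curB) ((stepB d s curB cache).1 :: _) (by simp)]
    have hih := ih (res ++ [fmtA curA] ++ ["|"]) (stepA d s curA)
      (stepB d s curB cache).1 (stepB d s curB cache).2 hinv' hrel'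
    rw [render_dropLast _ (by rw [hpre]; simp)] at hih
    rw [hpre] at hih
    simp only [List.cons_append, List.nil_append] at hih
    rw [← fmt_eq curA curB hrel]
    rw [hih]
    simp

-- invCache holds for the empty cache
lemma invCache_empty (d : List (String × String × List String)) :
    invCache d PySem.Dict.empty := by
  intro k v hk
  rw [PySem.Dict.get?_empty] at hk
  cases hk

-- ===== VERDICT (by name: the statement is the Claim_ definition above) =====
theorem nka_simulator_spec : Claim_equal_nka_simulator := by
  unfold Claim_equal_nka_simulator
  intro ulazni_niz skup_stanja abeceda prihvatljiva_stanja pocetno_stanje fje_prijelaza _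
  unfold Spec_nka_simulator nka_simulator nka_simulator_alt
  obtain ⟨hc1, hc2⟩ := closCache_spec fje_prijelaza PySem.Dict.empty pocetno_stanje
    (invCache_empty fje_prijelaza)
  have hrel : RelSet (epsClosure pocetno_stanje fje_prijelaza)
      (closCache fje_prijelaza PySem.Dict.empty pocetno_stanje).1 := by
    rw [hc1]
    exact ⟨epsClosure_nodup _ _, epsClosure_nodup _ _, fun _ => Iff.rfl⟩
  have := main_lemma fje_prijelaza ((PySem.Str.split? ulazni_niz ",").getD []) []
    (epsClosure pocetno_stanje fje_prijelaza)
    (closCache fje_prijelaza PySem.Dict.empty pocetno_stanje).1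
    (closCache fje_prijelaza PySem.Dict.empty pocetno_stanje).2 hc2 hrel
  simpa using this
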